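-- pv_equiv track=rewrite | github.com/collinsakenga/codewars_solutions | 4 kyu/4 kyu_Catching Car Mileage Numbers.py | is_interesting
-- ===== SOURCE A (Python) =====
-- def is_interesting(number, awesome_phrases):
--     if number < 98:
--         return 0
--     elif check(number, awesome_phrases) and number >= 100:
--         return 2
--     for i in range(number+1, number+3):
--         if i >= 100 and check(i, awesome_phrases):
--             return 1
--     return 0
--
-- def check(n, awesome_phrases):
--     return equal(n) or all_zero(n) or increase(n) or decrease(n) or palindrome(n) or awesome(n, awesome_phrases)
--
-- def equal(n):
--     return True if len(set(str(n))) == 1 else False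
--
-- def all_zero(n):
--     res = str(n)
--     return True if int(res[1:]) == 0 else False
--
-- def increase(n):
--     res = str(n)
--     for i in range(len(res)-1):
--         if not ((int(res[i+1])-int(res[i])) == 1 or ((int(res[i+1]) == 0 and int(res[i])) == 9)):
--             return False
--     return True
--
-- def decrease(n):
--     res = str(n)
--     for i in range(len(res)-1):
--         if not (int(res[i])-int(res[i+1])) == 1:
--             return False
--     return True
--
-- def palindrome(n):
--     return str(n) == str(n)[::-1]
--
-- def awesome(n, awesome_phrases):
--     if not awesome_phrases:
--         return False
--     return n in awesome_phrases
-- ===== SOURCE B (Python) =====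
-- def is_interesting(number, awesome_phrases):
--     if number < 98:
--         return 0
--     if number >= 100 and good(number, awesome_phrases):
--         return 2
--     if any(m >= 100 and good(m, awesome_phrases) for m in (number + 1, number + 2)):
--         return 1
--     return 0
--
-- def good(n, phrases):
--     s = str(n)
--     return (len(set(s)) == 1                           # all digits equal
--             or int(s[1:]) == 0                         # followed by all zeros
--             or s in '1234567890' * (len(s) // 10 + 2)  # incrementing (with the 9 -> 0 wrap)
--             or s in '9876543210'                       # decrementing
--             or s == s[::-1]                            # palindrome
--             or n in phrases)                           # awesome phrase
-- ===== Notes on version B (the rewrite author's own statement) =====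
-- stated objective: alternative
-- what changed: The per-index digit-difference loops of increase/decrease are replaced by substring membership: an incrementing number is a substring of '1234567890' repeated enough times to cover the 9->0 wrap, and a decrementing one is a substring of '9876543210'; the dispatcher checks the two follow-up mileages by a direct any() over (number+1, number+2) instead of a range loop.
import Mathlib
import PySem

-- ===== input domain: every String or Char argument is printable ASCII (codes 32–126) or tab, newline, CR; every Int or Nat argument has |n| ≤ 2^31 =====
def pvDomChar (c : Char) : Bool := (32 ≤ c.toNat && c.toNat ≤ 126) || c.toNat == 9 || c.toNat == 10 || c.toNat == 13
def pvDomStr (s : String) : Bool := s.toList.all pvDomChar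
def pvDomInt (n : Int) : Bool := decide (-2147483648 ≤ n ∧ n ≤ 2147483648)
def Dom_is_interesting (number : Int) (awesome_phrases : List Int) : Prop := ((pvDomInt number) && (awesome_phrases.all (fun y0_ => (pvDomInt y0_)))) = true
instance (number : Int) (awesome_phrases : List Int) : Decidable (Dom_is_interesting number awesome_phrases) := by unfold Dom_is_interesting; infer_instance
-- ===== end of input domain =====

-- B replaces the per-index digit-difference loops of increase/decrease by substring
-- membership in the periodic patterns '1234567890'* and '9876543210' (objective: alternative).

-- ===== PORT A =====
-- int(res[i]) on a one-character slice of str(n); the getD default 0 is never hit where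
-- this is used (every call site passes a digit character of str(n))
def pyDigit1 (c : Char) : Int := (PySem.Int.ofChars? [c]).getD 0

-- in each helper, Python's local 'res = str(n)' is inlined as 'PySem.Int.toChars n'
-- (a pure value, recomputed instead of bound)
def equalA (n : Int) : Bool :=
  if PySem.Set.len (PySem.Set.ofList (PySem.Int.toChars n)) == 1 then true else false

def all_zeroA (n : Int) : Bool :=
  -- True if int(res[1:]) == 0 else False; the ValueError case (none) is unreachable:
  -- every call site has n ≥ 98, so res[1:] is a non-empty string of digits
  if (match PySem.Int.ofChars? (PySem.List.slice (PySem.Int.toChars n) (some 1) none) with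
      | some v => v == 0
      | none => false) then true else false

def increaseA (n : Int) : Bool :=
  -- '(int(res[i+1]) == 0 and int(res[i])) == 9' under Python truthiness:
  -- if int(res[i+1]) == 0 the 'and' yields int(res[i]) and the comparison is == 9,
  -- otherwise it yields False and 'False == 9' is False
  (List.range ((PySem.Int.toChars n).length - 1)).all fun i =>
    (pyDigit1 ((PySem.Int.toChars n).getD (i+1) '0') - pyDigit1 ((PySem.Int.toChars n).getD i '0') == 1)
    || (if pyDigit1 ((PySem.Int.toChars n).getD (i+1) '0') == 0
        then pyDigit1 ((PySem.Int.toChars n).getD i '0') == 9 else false)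

def decreaseA (n : Int) : Bool :=
  (List.range ((PySem.Int.toChars n).length - 1)).all fun i =>
    (pyDigit1 ((PySem.Int.toChars n).getD i '0') - pyDigit1 ((PySem.Int.toChars n).getD (i+1) '0') == 1)

def palindromeA (n : Int) : Bool :=
  -- str(n) == str(n)[::-1]; slice? with step -1 is always some
  PySem.Int.toChars n == (PySem.List.slice? (PySem.Int.toChars n) none none (-1)).getD []

def awesomeA (n : Int) (awesome_phrases : List Int) : Bool :=
  if awesome_phrases == [] then false else awesome_phrases.contains n

def checkA (n : Int) (awesome_phrases : List Int) : Bool :=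
  equalA n || all_zeroA n || increaseA n || decreaseA n || palindromeA n
    || awesomeA n awesome_phrases

def is_interesting (number : Int) (awesome_phrases : List Int) : Int :=
  if number < 98 then 0
  else if checkA number awesome_phrases && decide (100 ≤ number) then 2
  else if (PySem.List.pyRange (number + 1) (number + 3) 1).any
            (fun i => decide (100 ≤ i) && checkA i awesome_phrases) then 1
  else 0

-- ===== PORT B =====
-- 's = str(n)' inlined as 'PySem.Int.toChars n' (a pure value)
def goodB (n : Int) (awesome_phrases : List Int) : Bool :=
  (PySem.Set.len (PySem.Set.ofList (PySem.Int.toChars n)) == 1)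
  || (match PySem.Int.ofChars? (PySem.List.slice (PySem.Int.toChars n) (some 1) none) with
      | some v => v == 0
      | none => false)   -- int(s[1:]) == 0; none unreachable: every call site has n ≥ 98
  -- s in '1234567890' * (len(s) // 10 + 2): string repetition as flattened replicate
  || PySem.Chars.isIn (PySem.Int.toChars n)
      (List.flatten (List.replicate ((PySem.Int.toChars n).length / 10 + 2)
        ['1','2','3','4','5','6','7','8','9','0']))
  || PySem.Chars.isIn (PySem.Int.toChars n) ['9','8','7','6','5','4','3','2','1','0']
  || (PySem.Int.toChars n == (PySem.List.slice? (PySem.Int.toChars n) none none (-1)).getD [])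
  || awesome_phrases.contains n

def is_interesting_alt (number : Int) (awesome_phrases : List Int) : Int :=
  if number < 98 then 0
  else if decide (100 ≤ number) && goodB number awesome_phrases then 2
  else if [number + 1, number + 2].any
            (fun m => decide (100 ≤ m) && goodB m awesome_phrases) then 1
  else 0

-- ===== PRECONDITION & SPEC =====
def Spec_is_interesting (number : Int) (awesome_phrases : List Int) (out : Int) : Prop := out = is_interesting_alt number awesome_phrases
instance (number : Int) (awesome_phrases : List Int) (out : Int) : Decidable (Spec_is_interesting number awesome_phrases out) := by unfold Spec_is_interesting; infer_instance

-- ===== CLAIM (what is proved, stated in full; the proofs are below) =====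
def Claim_equal_is_interesting : Prop := ∀ (number : Int) (awesome_phrases : List Int), Dom_is_interesting number awesome_phrases → Spec_is_interesting number awesome_phrases (is_interesting number awesome_phrases)

-- ===== LEMMAS AND PROOFS =====

-- decimal digit characters and their value
def isDig (c : Char) : Bool := 48 ≤ c.toNat && c.toNat ≤ 57

def dval (c : Char) : Nat := c.toNat - 48

-- first L characters of the infinite cyclic string 123456789012345678… started at digit d % 10
def cyc : Nat → Nat → List Char
  | _, 0 => []
  | d, L + 1 => Nat.digitChar (d % 10) :: cyc (d + 1) L

-- the chain relations of A's increase/decrease loops, on digit characters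
def UpR (a b : Char) : Prop := isDig a = true ∧ isDig b = true ∧ dval b = (dval a + 1) % 10

def DnR (a b : Char) : Prop := isDig a = true ∧ isDig b = true ∧ dval a = dval b + 1

theorem char_eq_of_toNat {c d : Char} (h : c.toNat = d.toNat) : c = d :=
  Char.ext (UInt32.toNat_inj.mp h)

theorem digit_cases {c : Char} (hc : isDig c = true) :
    c = '0' ∨ c = '1' ∨ c = '2' ∨ c = '3' ∨ c = '4' ∨ c = '5' ∨ c = '6' ∨ c = '7' ∨ c = '8' ∨ c = '9' := by
  simp only [isDig, Bool.and_eq_true, decide_eq_true_eq] at hc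
  obtain ⟨h1, h2⟩ := hc
  have hd : c.toNat = 48 ∨ c.toNat = 49 ∨ c.toNat = 50 ∨ c.toNat = 51 ∨ c.toNat = 52 ∨
      c.toNat = 53 ∨ c.toNat = 54 ∨ c.toNat = 55 ∨ c.toNat = 56 ∨ c.toNat = 57 := by omega
  rcases hd with h|h|h|h|h|h|h|h|h|h
  · exact Or.inl (char_eq_of_toNat (by rw [h]; decide))
  · exact Or.inr (Or.inl (char_eq_of_toNat (by rw [h]; decide)))
  · exact Or.inr (Or.inr (Or.inl (char_eq_of_toNat (by rw [h]; decide))))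
  · exact Or.inr (Or.inr (Or.inr (Or.inl (char_eq_of_toNat (by rw [h]; decide)))))
  · exact Or.inr (Or.inr (Or.inr (Or.inr (Or.inl (char_eq_of_toNat (by rw [h]; decide))))))
  · exact Or.inr (Or.inr (Or.inr (Or.inr (Or.inr (Or.inl (char_eq_of_toNat (by rw [h]; decide)))))))
  · exact Or.inr (Or.inr (Or.inr (Or.inr (Or.inr (Or.inr (Or.inl (char_eq_of_toNat (by rw [h]; decide))))))))
  · exact Or.inr (Or.inr (Or.inr (Or.inr (Or.inr (Or.inr (Or.inr (Or.inl (char_eq_of_toNat (by rw [h]; decide)))))))))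
  · exact Or.inr (Or.inr (Or.inr (Or.inr (Or.inr (Or.inr (Or.inr (Or.inr (Or.inl (char_eq_of_toNat (by rw [h]; decide))))))))))
  · exact Or.inr (Or.inr (Or.inr (Or.inr (Or.inr (Or.inr (Or.inr (Or.inr (Or.inr (char_eq_of_toNat (by rw [h]; decide))))))))))

theorem pyDigit1_eq {c : Char} (hc : isDig c = true) : pyDigit1 c = (dval c : Int) := by
  rcases digit_cases hc with rfl|rfl|rfl|rfl|rfl|rfl|rfl|rfl|rfl|rfl <;> decide

theorem dval_lt {c : Char} (hc : isDig c = true) : dval c < 10 := by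
  simp only [isDig, Bool.and_eq_true, decide_eq_true_eq] at hc
  unfold dval; omega

theorem dc_dval {c : Char} (hc : isDig c = true) : Nat.digitChar (dval c) = c := by
  rcases digit_cases hc with rfl|rfl|rfl|rfl|rfl|rfl|rfl|rfl|rfl|rfl <;> decide

theorem isDig_digitChar {k : Nat} (h : k < 10) : isDig (Nat.digitChar k) = true := by
  interval_cases k <;> decide

theorem dval_digitChar {k : Nat} (h : k < 10) : dval (Nat.digitChar k) = k := by
  interval_cases k <;> decide

theorem toDigitsCore_digits : ∀ (f m : Nat) (ds : List Char),
    (∀ c ∈ ds, isDig c = true) → ∀ c ∈ Nat.toDigitsCore 10 f m ds, isDig c = true := by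
  intro f
  induction f with
  | zero => intro m ds hds c hc; rw [Nat.toDigitsCore] at hc; exact hds c hc
  | succ f ih =>
    intro m ds hds c hc
    rw [Nat.toDigitsCore] at hc
    by_cases h0 : m / 10 = 0
    · rw [if_pos h0] at hc
      rcases List.mem_cons.mp hc with h | h
      · exact h ▸ isDig_digitChar (Nat.mod_lt _ (by omega))
      · exact hds c h
    · rw [if_neg h0] at hc
      refine ih (m / 10) _ ?_ c hc
      intro c' hc'
      rcases List.mem_cons.mp hc' with h | h
      · exact h ▸ isDig_digitChar (Nat.mod_lt _ (by omega))
      · exact hds c' h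

theorem toChars_digits {n : Int} (hn : 0 ≤ n) : ∀ c ∈ PySem.Int.toChars n, isDig c = true := by
  intro c hc
  have hn' : ¬ n < 0 := by omega
  simp only [PySem.Int.toChars, if_neg hn'] at hc
  rw [Nat.toDigits] at hc
  exact toDigitsCore_digits _ _ [] (by simp) c hc

theorem allRange_iff_chain (s : List Char) (p : Char → Char → Bool) :
    (((List.range (s.length - 1)).all fun i => p (s.getD i '0') (s.getD (i + 1) '0')) = true)
      ↔ List.IsChain (fun a b => p a b = true) s := by
  rw [List.isChain_iff_getElem, List.all_eq_true]
  constructor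
  · intro h i hi
    have h1 : i < s.length - 1 := by omega
    have h2 := h i (List.mem_range.mpr h1)
    rwa [List.getD_eq_getElem s '0' (by omega), List.getD_eq_getElem s '0' hi] at h2
  · intro h i hi
    have h1 : i + 1 < s.length := by
      have := List.mem_range.mp hi; omega
    rw [List.getD_eq_getElem s '0' (by omega), List.getD_eq_getElem s '0' h1]
    exact h i h1

theorem isChain_congr {R S : Char → Char → Prop} (s : List Char)
    (h : ∀ a ∈ s, ∀ b ∈ s, (R a b ↔ S a b)) : List.IsChain R s ↔ List.IsChain S s := by
  rw [List.isChain_iff_getElem, List.isChain_iff_getElem]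
  constructor
  · intro hh i hi
    exact (h _ (List.getElem_mem _) _ (List.getElem_mem _)).mp (hh i hi)
  · intro hh i hi
    exact (h _ (List.getElem_mem _) _ (List.getElem_mem _)).mpr (hh i hi)

theorem cyc_mod (d L : Nat) : cyc (d % 10) L = cyc d L := by
  induction L generalizing d with
  | zero => rfl
  | succ L ih =>
    show Nat.digitChar (d % 10 % 10) :: cyc (d % 10 + 1) L = Nat.digitChar (d % 10) :: cyc (d + 1) L
    have h1 : d % 10 % 10 = d % 10 := by omega
    have h2 : cyc (d % 10 + 1) L = cyc (d + 1) L :=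
      calc cyc (d % 10 + 1) L = cyc ((d % 10 + 1) % 10) L := (ih _).symm
        _ = cyc ((d + 1) % 10) L := by rw [show (d % 10 + 1) % 10 = (d + 1) % 10 by omega]
        _ = cyc (d + 1) L := ih _
    rw [h1, h2]

theorem cyc_append (d L1 L2 : Nat) : cyc d (L1 + L2) = cyc d L1 ++ cyc (d + L1) L2 := by
  induction L1 generalizing d with
  | zero => simp [cyc]
  | succ L1 ih =>
    have h : L1 + 1 + L2 = (L1 + L2) + 1 := by omega
    rw [h]
    show Nat.digitChar (d % 10) :: cyc (d + 1) (L1 + L2)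
      = (Nat.digitChar (d % 10) :: cyc (d + 1) L1) ++ cyc (d + (L1 + 1)) L2
    rw [List.cons_append, ih (d + 1), show d + 1 + L1 = d + (L1 + 1) by omega]

theorem isChain_cyc (d L : Nat) : List.IsChain UpR (cyc d L) := by
  induction L generalizing d with
  | zero => exact List.IsChain.nil
  | succ L ih =>
    show List.IsChain UpR (Nat.digitChar (d % 10) :: cyc (d + 1) L)
    rcases L with _ | L
    · exact List.IsChain.singleton _
    · show List.IsChain UpR (Nat.digitChar (d % 10) :: Nat.digitChar ((d + 1) % 10) :: cyc (d + 2) L)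
      refine List.isChain_cons_cons.mpr ⟨?_, ?_⟩
      · refine ⟨isDig_digitChar (by omega), isDig_digitChar (by omega), ?_⟩
        rw [dval_digitChar (by omega), dval_digitChar (by omega)]; omega
      · exact ih (d + 1)

theorem pat_eq_cyc (k : Nat) :
    List.flatten (List.replicate k ['1','2','3','4','5','6','7','8','9','0']) = cyc 1 (10 * k) := by
  induction k with
  | zero => rfl
  | succ k ih =>
    rw [List.replicate_succ, List.flatten_cons, ih]
    have h : 10 * (k + 1) = 10 + 10 * k := by omega
    rw [h, cyc_append 1 10 (10 * k)]
    have h2 : cyc (1 + 10) (10 * k) = cyc 1 (10 * k) := by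
      rw [← cyc_mod (1 + 10)]
    rw [h2]
    rfl

theorem up_det (s : List Char) (hs : ∀ c ∈ s, isDig c = true) (h : List.IsChain UpR s) :
    s = cyc (dval (s.headD '0')) s.length := by
  induction s with
  | nil => rfl
  | cons a t ih =>
    have ha : isDig a = true := hs a (by simp)
    have hlt : dval a < 10 := dval_lt ha
    show a :: t = cyc (dval a) (t.length + 1)
    have h1 : cyc (dval a) (t.length + 1)
        = Nat.digitChar (dval a % 10) :: cyc (dval a + 1) t.length := rfl
    rw [h1, Nat.mod_eq_of_lt hlt, dc_dval ha]
    rcases t with _ | ⟨b, t'⟩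
    · rfl
    · obtain ⟨hab, hch⟩ := List.isChain_cons_cons.mp h
      obtain ⟨_, hb, hv⟩ := hab
      have ht : b :: t' = cyc (dval b) (t'.length + 1) := ih (fun c hc => hs c (by simp [hc])) hch
      have h2 : cyc (dval a + 1) (b :: t').length = cyc (dval b) (t'.length + 1) := by
        rw [← cyc_mod (dval a + 1), ← hv]; rfl
      rw [List.cons.injEq]
      exact ⟨rfl, by rw [h2, ← ht]⟩

theorem up_chain_iff_infix (s : List Char) (hs : ∀ c ∈ s, isDig c = true) :
    List.IsChain UpR s ↔
      s <:+: List.flatten (List.replicate (s.length / 10 + 2) ['1','2','3','4','5','6','7','8','9','0']) := by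
  rw [pat_eq_cyc]
  constructor
  · intro h
    rcases s with _ | ⟨a, t⟩
    · exact List.nil_infix
    · have hdet := up_det _ hs h
      have helt : dval ((a :: t).headD '0') < 10 := dval_lt (hs a (by simp))
      generalize he : dval ((a :: t).headD '0') = e at hdet helt
      generalize hL : (a :: t).length = L at hdet
      have hLpos : 0 < L := by rw [← hL]; simp
      refine ⟨cyc 1 ((e + 9) % 10), cyc (e + L) (10 * (L / 10 + 2) - (e + 9) % 10 - L), ?_⟩
      have ho : (e + 9) % 10 ≤ 9 := by omega
      have hsum : 10 * (L / 10 + 2) = (e + 9) % 10 + (L + (10 * (L / 10 + 2) - (e + 9) % 10 - L)) := by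
        omega
      rw [hdet, hsum, cyc_append, cyc_append]
      have h1 : cyc (1 + (e + 9) % 10) L = cyc e L := by
        rw [← cyc_mod (1 + (e + 9) % 10), show (1 + (e + 9) % 10) % 10 = e % 10 by omega,
            cyc_mod]
      have h2 : cyc (1 + (e + 9) % 10 + L) (10 * (L / 10 + 2) - (e + 9) % 10 - L)
          = cyc (e + L) (10 * (L / 10 + 2) - (e + 9) % 10 - L) := by
        rw [← cyc_mod (1 + (e + 9) % 10 + L), show (1 + (e + 9) % 10 + L) % 10 = (e + L) % 10 by omega,
            cyc_mod]
      rw [h1, h2, List.append_assoc,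
          show (e + 9) % 10 + (L + (10 * (L / 10 + 2) - (e + 9) % 10 - L)) - (e + 9) % 10 - L
            = 10 * (L / 10 + 2) - (e + 9) % 10 - L by omega]
  · intro h
    obtain ⟨pre, post, hpp⟩ := h
    have hc : List.IsChain UpR (pre ++ s ++ post) := by
      rw [hpp]; exact isChain_cyc 1 _
    exact hc.left_of_append.right_of_append

theorem dn_prefix : ∀ (t : List Char) (a : Char), List.IsChain DnR (a :: t) → isDig a = true →
    (a :: t) <+: (['9','8','7','6','5','4','3','2','1','0'] : List Char).drop (9 - dval a) := by
  intro t
  induction t with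
  | nil =>
    intro a _ ha
    rcases digit_cases ha with rfl|rfl|rfl|rfl|rfl|rfl|rfl|rfl|rfl|rfl <;> decide
  | cons b t' ih =>
    intro a h ha
    obtain ⟨hab, hch⟩ := List.isChain_cons_cons.mp h
    obtain ⟨_, hb, hv⟩ := hab
    have key : 9 - dval b = 10 - dval a ∧ 1 ≤ dval a := by
      have := dval_lt ha; omega
    have hstep : (['9','8','7','6','5','4','3','2','1','0'] : List Char).drop (9 - dval a)
        = a :: (['9','8','7','6','5','4','3','2','1','0'] : List Char).drop (9 - dval b) := by
      rw [key.1]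
      rcases digit_cases ha with rfl|rfl|rfl|rfl|rfl|rfl|rfl|rfl|rfl|rfl
      · exact absurd key.2 (by decide)
      all_goals decide
    rw [hstep]
    exact List.cons_prefix_cons.mpr ⟨rfl, ih b hch hb⟩

theorem dn_chain_iff_infix (s : List Char) (hs : ∀ c ∈ s, isDig c = true) :
    List.IsChain DnR s ↔ s <:+: (['9','8','7','6','5','4','3','2','1','0'] : List Char) := by
  constructor
  · intro h
    rcases s with _ | ⟨a, t⟩
    · exact List.nil_infix
    · obtain ⟨r, hr⟩ := dn_prefix t a h (hs a (by simp))
      refine ⟨(['9','8','7','6','5','4','3','2','1','0'] : List Char).take (9 - dval a), r, ?_⟩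
      rw [List.append_assoc, hr, List.take_append_drop]
  · intro h
    obtain ⟨pre, post, hpp⟩ := h
    have hc : List.IsChain DnR (pre ++ s ++ post) := by
      rw [hpp]
      refine .cons_cons ?_ (.cons_cons ?_ (.cons_cons ?_ (.cons_cons ?_ (.cons_cons ?_
        (.cons_cons ?_ (.cons_cons ?_ (.cons_cons ?_ (.cons_cons ?_ (.singleton _)))))))))
      all_goals (unfold DnR; exact ⟨by decide, by decide, by decide⟩)
    exact hc.left_of_append.right_of_append

theorem inc_eq (s : List Char) (hs : ∀ c ∈ s, isDig c = true) :
    ((List.range (s.length - 1)).all fun i =>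
      (pyDigit1 (s.getD (i+1) '0') - pyDigit1 (s.getD i '0') == 1)
      || (if pyDigit1 (s.getD (i+1) '0') == 0 then pyDigit1 (s.getD i '0') == 9 else false))
    = PySem.Chars.isIn s
        (List.flatten (List.replicate (s.length / 10 + 2) ['1','2','3','4','5','6','7','8','9','0'])) := by
  rw [Bool.eq_iff_iff, PySem.Chars.isIn_iff_infix,
      allRange_iff_chain s (fun a b =>
        (pyDigit1 b - pyDigit1 a == 1) || (if pyDigit1 b == 0 then pyDigit1 a == 9 else false)),
      isChain_congr s (S := UpR) ?_, up_chain_iff_infix s hs]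
  intro a haa b hbb
  have ha := hs a haa
  have hb := hs b hbb
  have la := dval_lt ha
  have lb := dval_lt hb
  rw [pyDigit1_eq ha, pyDigit1_eq hb]
  unfold UpR
  simp only [Bool.or_eq_true, beq_iff_eq, ha, hb, true_and]
  by_cases h0 : (dval b : Int) = 0
  · rw [if_pos (by simpa using h0)]
    simp only [beq_iff_eq]
    omega
  · rw [if_neg (by simpa using h0)]
    simp only [Bool.false_eq_true, or_false]
    omega

theorem dec_eq (s : List Char) (hs : ∀ c ∈ s, isDig c = true) :
    ((List.range (s.length - 1)).all fun i =>
      (pyDigit1 (s.getD i '0') - pyDigit1 (s.getD (i+1) '0') == 1))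
    = PySem.Chars.isIn s (['9','8','7','6','5','4','3','2','1','0'] : List Char) := by
  rw [Bool.eq_iff_iff, PySem.Chars.isIn_iff_infix,
      allRange_iff_chain s (fun a b => (pyDigit1 a - pyDigit1 b == 1)),
      isChain_congr s (S := DnR) ?_, dn_chain_iff_infix s hs]
  intro a haa b hbb
  have ha := hs a haa
  have hb := hs b hbb
  have la := dval_lt ha
  have lb := dval_lt hb
  rw [pyDigit1_eq ha, pyDigit1_eq hb]
  unfold DnR
  simp only [beq_iff_eq, ha, hb, true_and]
  omega

theorem ite_tf (b : Bool) : (if b then true else false) = b := by cases b <;> rfl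

theorem check_eq_good (n : Int) (hn : 98 ≤ n) (ph : List Int) : checkA n ph = goodB n ph := by
  have hd : ∀ c ∈ PySem.Int.toChars n, isDig c = true := toChars_digits (by omega)
  have haw : (if ph == [] then false else ph.contains n) = ph.contains n := by
    cases ph <;> simp
  unfold checkA goodB equalA all_zeroA increaseA decreaseA palindromeA awesomeA
  rw [inc_eq (PySem.Int.toChars n) hd, dec_eq (PySem.Int.toChars n) hd, haw, ite_tf, ite_tf]

theorem range_two (number : Int) :
    PySem.List.pyRange (number + 1) (number + 3) 1 = [number + 1, number + 2] := by
  rw [PySem.List.pyRange_one_cons (by omega), PySem.List.pyRange_one_cons (by omega),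
      PySem.List.pyRange_one_eq_nil (by omega)]
  have h : number + 1 + 1 = number + 2 := by ring
  rw [h]

-- ===== VERDICT (by name: the statement is the Claim_ definition above) =====
theorem is_interesting_spec : Claim_equal_is_interesting := by
  intro number ph _
  unfold Spec_is_interesting is_interesting is_interesting_alt
  by_cases h98 : number < 98
  · rw [if_pos h98, if_pos h98]
  · rw [range_two]
    simp only [List.any_cons, List.any_nil, Bool.or_false]
    rw [check_eq_good number (by omega) ph, check_eq_good (number + 1) (by omega) ph,
        check_eq_good (number + 2) (by omega) ph, Bool.and_comm]
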